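-- pv_equiv track=rewrite | github.com/whisper120/CoinDetector | GUI_hybrid.py | hebrew_letters_to_civil_year
-- ===== SOURCE A (Python) =====
-- HEBREW_LETTER_VALUES = {
--     "alef": 1,
--     "bet": 2,
--     "gimel": 3,
--     "daled": 4,
--     "hey": 5,
--     "vav": 6,
--     "zayin": 7,
--     "heth": 8,
--     "tet": 9,
--     "mem": 40,
--     "noon": 50,
--     "sameh": 60,
--     "hain": 70,
--     "pay": 80,
--     "shin": 300,
--     "thaf": 400
-- }
--
-- def hebrew_letters_to_civil_year(letters):
--     total = 0
--     hey_used_as_5000 = False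
--
--     for letter in letters:
--         lower_letter = letter.lower()
--         if lower_letter == "hey" and not hey_used_as_5000:
--             total += 5000
--             hey_used_as_5000 = True
--         else:
--             value = HEBREW_LETTER_VALUES.get(lower_letter)
--             if value is None:
--                 raise ValueError(f"Unknown letter: {letter}")
--             total += value
--
--     civil_year = total - 3760
--     return civil_year
-- ===== SOURCE B (Python) =====
-- HEBREW_LETTER_VALUES = {
--     "alef": 1, "bet": 2, "gimel": 3, "daled": 4, "hey": 5, "vav": 6,
--     "zayin": 7, "heth": 8, "tet": 9, "mem": 40, "noon": 50, "sameh": 60,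
--     "hain": 70, "pay": 80, "shin": 300, "thaf": 400
-- }
--
-- def hebrew_letters_to_civil_year(letters):
--     # one uniform summing pass; the first-hey-counts-as-5000 rule becomes a
--     # one-shot +4995 correction instead of a stateful flag
--     total = 0
--     for letter in letters:
--         value = HEBREW_LETTER_VALUES.get(letter.lower())
--         if value is None:
--             raise ValueError(f"Unknown letter: {letter}")
--         total += value
--     if any(letter.lower() == "hey" for letter in letters):
--         total += 4995
--     return total - 3760
-- ===== Notes on version B (the rewrite author's own statement) =====
-- stated objective: simpler
-- what changed: Replaces A's stateful hey_used_as_5000 flag threaded through the loop with a uniform dict-value sum plus a one-shot +4995 correction when any letter lowercases to 'hey'.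
-- outside the precondition, e.g. on hebrew_letters_to_civil_year(['xx']): A raises ValueError, B raises ValueError
import Mathlib
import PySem

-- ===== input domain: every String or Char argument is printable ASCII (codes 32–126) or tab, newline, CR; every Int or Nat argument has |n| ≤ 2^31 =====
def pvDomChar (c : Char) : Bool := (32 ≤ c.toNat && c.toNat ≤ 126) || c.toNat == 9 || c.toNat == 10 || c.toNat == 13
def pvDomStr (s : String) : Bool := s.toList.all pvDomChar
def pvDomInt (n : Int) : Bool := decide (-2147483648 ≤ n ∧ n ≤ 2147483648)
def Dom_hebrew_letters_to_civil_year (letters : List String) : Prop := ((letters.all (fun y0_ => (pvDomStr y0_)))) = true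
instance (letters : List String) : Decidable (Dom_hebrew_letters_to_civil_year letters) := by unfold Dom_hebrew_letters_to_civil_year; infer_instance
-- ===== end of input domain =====

-- B replaces A's stateful first-hey flag with a uniform dict-value sum plus a one-shot +4995 correction (same result, simpler decomposition).


-- ===== PORT A =====
-- HEBREW_LETTER_VALUES (shared module-level constant of both Python files)
def pvHLV : PySem.Dict String Int := PySem.Dict.ofList
  [("alef", 1), ("bet", 2), ("gimel", 3), ("daled", 4), ("hey", 5), ("vav", 6),
   ("zayin", 7), ("heth", 8), ("tet", 9), ("mem", 40), ("noon", 50), ("sameh", 60),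
   ("hain", 70), ("pay", 80), ("shin", 300), ("thaf", 400)]

-- A's loop: state (total, hey_used_as_5000); on an unknown letter Python raises
-- ValueError — that input is outside Pre_, the port skips the letter there.
def pvLoopA : List String → Int → Bool → Int
  | [], total, _ => total
  | letter :: rest, total, heyUsed =>
    let lower := PySem.Str.lower letter
    if lower == "hey" && !heyUsed then
      pvLoopA rest (total + 5000) true
    else
      match pvHLV.get? lower with
      | none => pvLoopA rest total heyUsed   -- Python: raise ValueError (excluded by Pre_)
      | some v => pvLoopA rest (total + v) heyUsed

def hebrew_letters_to_civil_year (letters : List String) : Int :=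
  pvLoopA letters 0 false - 3760

-- ===== PORT B =====
-- B's single summing pass (raise on unknown letter ported as skipping; outside Pre_)
def pvLoopB : List String → Int → Int
  | [], total => total
  | letter :: rest, total =>
    match pvHLV.get? (PySem.Str.lower letter) with
    | none => pvLoopB rest total   -- Python: raise ValueError (excluded by Pre_)
    | some v => pvLoopB rest (total + v)

def hebrew_letters_to_civil_year_alt (letters : List String) : Int :=
  let total := pvLoopB letters 0
  let total := if letters.any (fun l => PySem.Str.lower l == "hey") then total + 4995 else total
  total - 3760

-- ===== PRECONDITION & SPEC =====
-- Pre_ excludes exactly the inputs on which Python A raises ValueError: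
-- some letter's lowercase is not a key of HEBREW_LETTER_VALUES.
def pvHebrewKeys : List String :=
  ["alef", "bet", "gimel", "daled", "hey", "vav", "zayin", "heth", "tet",
   "mem", "noon", "sameh", "hain", "pay", "shin", "thaf"]

def Pre_hebrew_letters_to_civil_year (letters : List String) : Prop :=
  (letters.all (fun l => pvHebrewKeys.contains (PySem.Str.lower l))) = true
instance (letters : List String) : Decidable (Pre_hebrew_letters_to_civil_year letters) := by
  unfold Pre_hebrew_letters_to_civil_year; infer_instance

def pvWitness_hebrew_letters_to_civil_year : List String := ["Hey", "bet", "hey", "shin"]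

def Spec_hebrew_letters_to_civil_year (letters : List String) (out : Int) : Prop := out = hebrew_letters_to_civil_year_alt letters
instance (letters : List String) (out : Int) : Decidable (Spec_hebrew_letters_to_civil_year letters out) := by unfold Spec_hebrew_letters_to_civil_year; infer_instance

-- ===== CLAIM (what is proved, stated in full; the proofs are below) =====
def Claim_equal_hebrew_letters_to_civil_year : Prop := ∀ (letters : List String), Dom_hebrew_letters_to_civil_year letters → Pre_hebrew_letters_to_civil_year letters → Spec_hebrew_letters_to_civil_year letters (hebrew_letters_to_civil_year letters)

-- ===== LEMMAS AND PROOFS =====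

-- a key of HEBREW_LETTER_VALUES always has a value
lemma pvGet_isSome {s : String} (h : pvHebrewKeys.contains s = true) :
    (pvHLV.get? s).isSome = true := by
  simp [pvHebrewKeys] at h
  rcases h with rfl | rfl | rfl | rfl | rfl | rfl | rfl | rfl | rfl | rfl | rfl | rfl | rfl | rfl | rfl | rfl <;> decide

-- B's loop is linear in its accumulator
lemma pvLoopB_shift (ls : List String) (t c : Int) :
    pvLoopB ls (t + c) = pvLoopB ls t + c := by
  induction ls generalizing t with
  | nil => simp [pvLoopB]
  | cons l rest ih =>
    simp only [pvLoopB]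
    cases pvHLV.get? (PySem.Str.lower l) with
    | none => exact ih t
    | some v =>
      simp only []
      rw [show t + c + v = t + v + c by ring]; exact ih (t + v)

-- main invariant: A's stateful loop = B's sum + one-shot 4995 correction
lemma pvLoop_eq (ls : List String) (t : Int) (b : Bool)
    (h : (ls.all (fun l => pvHebrewKeys.contains (PySem.Str.lower l))) = true) :
    pvLoopA ls t b =
      pvLoopB ls t +
        (if !b && ls.any (fun l => PySem.Str.lower l == "hey") then 4995 else 0) := by
  induction ls generalizing t b with
  | nil => simp [pvLoopA, pvLoopB]
  | cons l rest ih =>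
    simp only [List.all_cons, Bool.and_eq_true] at h
    obtain ⟨hl, hrest⟩ := h
    simp only [pvLoopA, pvLoopB, List.any_cons]
    by_cases hhey : PySem.Str.lower l == "hey"
    · -- this letter is a hey
      have hv : pvHLV.get? (PySem.Str.lower l) = some 5 := by
        rw [show PySem.Str.lower l = "hey" from by simpa using hhey]; decide
      rw [hv]
      cases b with
      | false =>
        simp only [Bool.not_false, Bool.true_and, hhey, if_pos trivial, Bool.true_or]
        rw [ih _ true hrest]
        simp [show t + 5000 = t + 5 + 4995 by ring, pvLoopB_shift]
      | true =>
        simp [hhey, ih _ true hrest]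
    · -- not a hey: condition false for every flag value
      have hc : (PySem.Str.lower l == "hey" && !b) = false := by
        simp [Bool.eq_false_iff.mpr (fun hx => hhey hx)]
      rw [hc, if_neg (by simp)]
      cases hv : pvHLV.get? (PySem.Str.lower l) with
      | none =>
        have := pvGet_isSome hl
        rw [hv] at this; cases this
      | some v =>
        simp only [Bool.eq_false_iff.mpr hhey, Bool.false_or]
        exact ih _ b hrest

-- ===== VERDICT (by name: the statement is the Claim_ definition above) =====
theorem hebrew_letters_to_civil_year_spec : Claim_equal_hebrew_letters_to_civil_year := by
  intro letters _ hpre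
  unfold Spec_hebrew_letters_to_civil_year hebrew_letters_to_civil_year hebrew_letters_to_civil_year_alt
  rw [pvLoop_eq letters 0 false hpre]
  by_cases hany : letters.any (fun l => PySem.Str.lower l == "hey") = true <;>
    simp [hany]
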